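-- pv_equiv track=rewrite | github.com/billdbot9000/project_euler | 20-Factorial_digit_sum.py | FactorialMod10
-- ===== SOURCE A (Python) =====
-- def FactorialMod10(n):
--     product = 1
--     while n > 1:
--         product = product*n
--         n = n-1
--         while product % 10 == 0:
--             product //= 10
--     return product
-- ===== SOURCE B (Python) =====
-- def FactorialMod10(n):
--     if n <= 1:
--         return 1
--     # product of 2..n by binary splitting (balanced product tree)
--     def prod_range(a, b):
--         if a > b:
--             return 1
--         if a == b:
--             return a
--         m = (a + b) // 2
--         return prod_range(a, m) * prod_range(m + 1, b)
--     f = prod_range(2, n)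
--     # number of trailing zeros of n! = v5(n!) by Legendre's formula
--     t = 0
--     p = 5
--     while p <= n:
--         t += n // p
--         p *= 5
--     return f // (10 ** t)
-- ===== Notes on version B (the rewrite author's own statement) =====
-- stated objective: faster
-- what changed: Replaces the one-factor-at-a-time product with incremental zero stripping by a balanced binary-splitting product tree for the factorial followed by a single exact division removing all trailing zeros, whose count is computed arithmetically via Legendre's formula instead of by repeatedly dividing the big product; intended as faster, and a timing run measured a roughly thirty-fold speed-up at the largest size where A finished.
import Mathlib
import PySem

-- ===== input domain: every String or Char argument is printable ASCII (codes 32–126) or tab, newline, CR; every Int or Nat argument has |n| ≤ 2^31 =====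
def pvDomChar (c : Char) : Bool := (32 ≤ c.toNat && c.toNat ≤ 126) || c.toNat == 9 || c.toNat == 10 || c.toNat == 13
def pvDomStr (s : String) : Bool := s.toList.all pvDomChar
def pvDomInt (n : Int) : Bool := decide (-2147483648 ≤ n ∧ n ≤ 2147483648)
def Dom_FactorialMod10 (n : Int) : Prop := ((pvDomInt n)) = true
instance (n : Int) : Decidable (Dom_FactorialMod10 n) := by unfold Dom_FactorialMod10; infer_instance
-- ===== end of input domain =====

-- B replaces A's factor-by-factor product with incremental zero stripping by a binary-splitting
-- product tree for the factorial and one exact division removing the trailing zeros, with their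
-- count from Legendre's formula (objective: faster; a timing run measured a roughly thirty-fold
-- speed-up at the largest size where A finished).

-- ===== PORT A =====
-- inner `while product % 10 == 0: product //= 10`; the `0 < p` conjunct is only a
-- totality guard (in A, product is always positive when this loop runs)
def pvStrip10 (p : Int) : Int :=
  if h : 0 < p ∧ PySem.Int.mod p 10 = 0 then pvStrip10 (PySem.Int.floordiv p 10) else p
termination_by p.toNat
decreasing_by
  have h10 : PySem.Int.floordiv p 10 = p / 10 := PySem.Int.floordiv_eq_ediv_of_pos (by omega)
  rw [h10]; omega

-- outer `while n > 1` loop of A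
def pvLoopA (n product : Int) : Int :=
  if h : n > 1 then pvLoopA (n - 1) (pvStrip10 (product * n)) else product
termination_by n.toNat
decreasing_by omega

def FactorialMod10 (n : Int) : Int := pvLoopA n 1

-- ===== PORT B =====
-- B's prod_range: balanced binary-splitting product of the integers a..b
def pvProdRange (a b : Int) : Int :=
  if a > b then 1
  else if h : a = b then a
  else
    pvProdRange a (PySem.Int.floordiv (a + b) 2) *
      pvProdRange (PySem.Int.floordiv (a + b) 2 + 1) b
termination_by (b - a).toNat
decreasing_by
  · have hm := PySem.Int.floordiv_two_mid_bounds (lo := a) (hi := b) (by omega)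
    have hlt := PySem.Int.floordiv_lt_iff_lt_mul (a := a + b) (b := 2) (q := b) (by norm_num)
    omega
  · have hm := PySem.Int.floordiv_two_mid_bounds (lo := a) (hi := b) (by omega)
    omega

-- B's `while p <= n` Legendre loop; the `0 < p` conjunct is only a totality guard
-- (in B, p is always a positive power of 5)
def pvLegLoop (n p t : Int) : Int :=
  if h : 0 < p ∧ p ≤ n then pvLegLoop n (p * 5) (t + PySem.Int.floordiv n p) else t
termination_by (n + 1 - p).toNat
decreasing_by
  obtain ⟨h1, h2⟩ := h
  omega

def FactorialMod10_alt (n : Int) : Int :=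
  if n ≤ 1 then 1
  else
    PySem.Int.floordiv (pvProdRange 2 n) (10 ^ (pvLegLoop n 5 0).toNat)
    -- Python's `10 ** t` with the (always nonnegative) int t ported as `10 ^ t.toNat`

-- ===== PRECONDITION & SPEC =====
def Spec_FactorialMod10 (n : Int) (out : Int) : Prop := out = FactorialMod10_alt n
instance (n : Int) (out : Int) : Decidable (Spec_FactorialMod10 n out) := by unfold Spec_FactorialMod10; infer_instance

-- ===== CLAIM (what is proved, stated in full; the proofs are below) =====
def Claim_equal_FactorialMod10 : Prop := ∀ (n : Int), Dom_FactorialMod10 n → Spec_FactorialMod10 n (FactorialMod10 n)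

-- ===== LEMMAS AND PROOFS =====

-- mathematical product 2..n (= n! for n ≥ 1), used only in proofs
def pvFac (n : Int) : Int := if n ≤ 1 then 1 else n * pvFac (n - 1)
termination_by n.toNat
decreasing_by omega

theorem pvFac_le (n : Int) (h : n ≤ 1) : pvFac n = 1 := by
  unfold pvFac; simp [h]

theorem pvFac_gt (n : Int) (h : 1 < n) : pvFac n = n * pvFac (n - 1) := by
  rw [pvFac]; simp [not_le.mpr h]

theorem pvFac_eq_factorial : ∀ n : Int, pvFac n = (Nat.factorial n.toNat : Int) := by
  intro n
  fun_induction pvFac n with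
  | case1 n h =>
    have h0 : n.toNat = 0 ∨ n.toNat = 1 := by omega
    rcases h0 with h0 | h0 <;> simp [h0, Nat.factorial]
  | case2 n h ih =>
    have h1 : n.toNat = (n - 1).toNat + 1 := by omega
    rw [ih, h1, Nat.factorial_succ]
    push_cast
    rw [Int.toNat_of_nonneg (by omega)]
    ring

theorem pvStrip10_spec (p : Int) (hp : 0 < p) :
    ∃ k : ℕ, pvStrip10 p * 10 ^ k = p ∧ 0 < pvStrip10 p ∧ PySem.Int.mod (pvStrip10 p) 10 ≠ 0 := by
  fun_induction pvStrip10 p with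
  | case1 p h ih =>
    have hq : PySem.Int.floordiv p 10 * 10 + PySem.Int.mod p 10 = p :=
      PySem.Int.floordiv_mul_add_mod p 10
    have hq' : PySem.Int.floordiv p 10 * 10 = p := by omega
    have hqpos : 0 < PySem.Int.floordiv p 10 := by nlinarith [h.1]
    obtain ⟨k, hk, hpos, hmod⟩ := ih hqpos
    exact ⟨k + 1, by rw [pow_succ, ← mul_assoc, hk, hq'], hpos, hmod⟩
  | case2 p h =>
    exact ⟨0, by ring, hp, fun hm => h ⟨hp, hm⟩⟩

theorem pvLoopA_spec (n p : Int) : 0 < p → PySem.Int.mod p 10 ≠ 0 →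
    ∃ k : ℕ, pvLoopA n p * 10 ^ k = p * pvFac n ∧ 0 < pvLoopA n p ∧
      PySem.Int.mod (pvLoopA n p) 10 ≠ 0 := by
  fun_induction pvLoopA n p with
  | case1 n p h ih =>
    intro hp hm
    have hpn : 0 < p * n := by positivity
    obtain ⟨k1, hk1, hs_pos, hs_mod⟩ := pvStrip10_spec (p * n) hpn
    obtain ⟨k2, hk2, hpos, hmod⟩ := ih hs_pos hs_mod
    refine ⟨k1 + k2, ?_, hpos, hmod⟩
    rw [pvFac_gt n h, pow_add]
    linear_combination (10:Int) ^ k1 * hk2 + pvFac (n - 1) * hk1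
  | case2 n p h =>
    intro hp hm
    exact ⟨0, by rw [pvFac_le n (by omega)]; ring, hp, hm⟩

-- top-down product a..b, bridge between the tree and pvFac
def pvIcc (a b : Int) : Int := if b < a then 1 else pvIcc a (b - 1) * b
termination_by (b - a + 1).toNat
decreasing_by omega

theorem pvIcc_stop (a b : Int) (h : b < a) : pvIcc a b = 1 := by
  rw [pvIcc]; simp [h]

theorem pvIcc_step (a b : Int) (h : a ≤ b) : pvIcc a b = pvIcc a (b - 1) * b := by
  rw [pvIcc]; simp [not_lt.mpr h]

theorem pvIcc_merge (a : Int) : ∀ (d : ℕ) (m b : Int), b - m = d → a - 1 ≤ m → m ≤ b →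
    pvIcc a m * pvIcc (m + 1) b = pvIcc a b := by
  intro d
  induction d with
  | zero => intro m b h1 h2 h3
            have : m = b := by omega
            subst this
            rw [pvIcc_stop (m+1) m (by omega)]; ring
  | succ d ih =>
    intro m b h1 h2 h3
    rw [pvIcc_step (m+1) b (by omega), pvIcc_step a b (by omega), ← mul_assoc,
      ih m (b-1) (by omega) h2 (by omega)]

theorem pvProdRange_eq_pvIcc : ∀ a b : Int, pvProdRange a b = pvIcc a b := by
  intro a b
  fun_induction pvProdRange a b with
  | case1 a b h => rw [pvIcc_stop a b (by omega)]
  | case2 b h1 =>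
    rw [pvIcc_step b b (le_refl b), pvIcc_stop b (b-1) (by omega)]; ring
  | case3 a b h1 h2 ih1 ih2 =>
    have hm := PySem.Int.floordiv_two_mid_bounds (lo := a) (hi := b) (by omega)
    have hlt := PySem.Int.floordiv_lt_iff_lt_mul (a := a + b) (b := 2) (q := b) (by norm_num)
    rw [ih1, ih2, pvIcc_merge a (b - PySem.Int.floordiv (a+b) 2).toNat _ b (by omega) (by omega) (by omega)]

theorem pvIcc_two_eq_pvFac : ∀ n : Int, 1 ≤ n → pvIcc 2 n = pvFac n := by
  intro n
  fun_induction pvFac n with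
  | case1 n h => intro h1
                 have : n = 1 := by omega
                 subst this
                 rw [pvIcc_stop 2 1 (by omega)]
  | case2 n h ih =>
    intro _
    rw [pvIcc_step 2 n (by omega), ih (by omega)]; ring

theorem pvLegLoop_sum (n : Int) (hn : 0 ≤ n) :
    ∀ (c j : ℕ) (t : Int), n < 5 ^ (j + c) →
      pvLegLoop n (5 ^ j) t = t + ∑ i ∈ Finset.Ico j (j + c), PySem.Int.floordiv n (5 ^ i) := by
  intro c
  induction c with
  | zero =>
    intro j t hb
    simp only [Nat.add_zero] at hb ⊢
    have hnot : ¬(0 < (5:Int) ^ j ∧ (5:Int) ^ j ≤ n) := by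
      rintro ⟨-, h2⟩; omega
    rw [pvLegLoop.eq_def, dif_neg hnot]
    simp
  | succ c ih =>
    intro j t hb
    have h5 : (0:Int) < 5 ^ j := by positivity
    by_cases hle : (5:Int) ^ j ≤ n
    · rw [pvLegLoop.eq_def]
      simp only [dif_pos (And.intro h5 hle)]
      have h55 : (5:Int) ^ j * 5 = 5 ^ (j + 1) := by ring
      rw [h55, ih (j + 1) _ (by have : j + 1 + c = j + (c + 1) := by omega
                                rw [this]; exact hb)]
      rw [Finset.sum_Ico_eq_sum_range, Finset.sum_Ico_eq_sum_range]
      have harr : j + (c + 1) - j = c + 1 := by omega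
      have harr2 : j + 1 + c - (j + 1) = c := by omega
      rw [harr, harr2, Finset.sum_range_succ']
      simp only [Nat.add_zero, pow_zero]
      have : ∀ i ∈ Finset.range c, PySem.Int.floordiv n (5 ^ (j + 1 + i)) = PySem.Int.floordiv n (5 ^ (j + (i + 1))) := by
        intro i _
        rw [show j + 1 + i = j + (i + 1) from by omega]
      rw [Finset.sum_congr rfl this]
      ring
    · have hnot : ¬(0 < (5:Int) ^ j ∧ (5:Int) ^ j ≤ n) := by
        rintro ⟨-, h2⟩; exact hle h2
      rw [pvLegLoop.eq_def, dif_neg hnot]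
      have hz : ∀ i ∈ Finset.Ico j (j + (c+1)), PySem.Int.floordiv n (5 ^ i) = 0 := by
        intro i hi
        simp only [Finset.mem_Ico] at hi
        have h5i : (0:Int) < 5 ^ i := by positivity
        have hni : n < 5 ^ i := by
          calc n < 5 ^ j := by omega
          _ ≤ 5 ^ i := by exact pow_le_pow_right₀ (by norm_num) hi.1
        rw [PySem.Int.floordiv_eq_ediv_of_pos h5i, Int.ediv_eq_zero_of_lt hn hni]
      rw [Finset.sum_congr rfl hz]
      simp

-- trailing-zero count T of n! and the exact quotient q = n!/10^T
theorem pvV5_le_pvV2 (N : ℕ) (hN : 2 ≤ N) :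
    padicValNat 5 (Nat.factorial N) ≤ padicValNat 2 (Nat.factorial N) := by
  have h5 : Fact (Nat.Prime 5) := ⟨by norm_num⟩
  have h2 : Fact (Nat.Prime 2) := ⟨by norm_num⟩
  rw [padicValNat_factorial (b := N + 1) (by have := Nat.log_le_self 5 N; omega),
    padicValNat_factorial (b := N + 1) (by have := Nat.log_le_self 2 N; omega)]
  refine Finset.sum_le_sum ?_
  intro i _
  exact Nat.div_le_div_left (Nat.pow_le_pow_left (by norm_num) i) (Nat.pow_pos (by norm_num))

theorem pvTenPow_dvd (N : ℕ) (hN : 2 ≤ N) :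
    10 ^ padicValNat 5 (Nat.factorial N) ∣ Nat.factorial N := by
  have h5 : Fact (Nat.Prime 5) := ⟨by norm_num⟩
  have h2 : Fact (Nat.Prime 2) := ⟨by norm_num⟩
  have hfne : Nat.factorial N ≠ 0 := Nat.factorial_ne_zero N
  set T := padicValNat 5 (Nat.factorial N)
  have hd5 : 5 ^ T ∣ Nat.factorial N := (padicValNat_dvd_iff_le hfne).mpr le_rfl
  have hd2 : 2 ^ T ∣ Nat.factorial N :=
    (padicValNat_dvd_iff_le hfne).mpr (pvV5_le_pvV2 N hN)
  have hco : Nat.Coprime (2 ^ T) (5 ^ T) :=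
    Nat.Coprime.pow _ _ (by norm_num)
  have : 2 ^ T * 5 ^ T ∣ Nat.factorial N := hco.mul_dvd_of_dvd_of_dvd hd2 hd5
  calc (10:ℕ) ^ T = 2 ^ T * 5 ^ T := by rw [← Nat.mul_pow]
  _ ∣ Nat.factorial N := this

theorem pvQuot_not_dvd (N : ℕ) (hN : 2 ≤ N) :
    ¬ (10 ∣ Nat.factorial N / 10 ^ padicValNat 5 (Nat.factorial N)) := by
  have h5 : Fact (Nat.Prime 5) := ⟨by norm_num⟩
  have hfne : Nat.factorial N ≠ 0 := Nat.factorial_ne_zero N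
  set T := padicValNat 5 (Nat.factorial N) with hT
  intro hdvd
  have hq : Nat.factorial N / 10 ^ T * 10 ^ T = Nat.factorial N :=
    Nat.div_mul_cancel (pvTenPow_dvd N hN)
  have h5q : 5 ∣ Nat.factorial N / 10 ^ T := dvd_trans (by norm_num) hdvd
  have : 5 ^ (T + 1) ∣ Nat.factorial N := by
    rw [← hq, pow_succ, mul_comm ((5:ℕ)^T) 5]
    exact Nat.mul_dvd_mul h5q (pow_dvd_pow_of_dvd (by norm_num) T)
  have := (padicValNat_dvd_iff_le hfne).mp this
  omega

-- B's Legendre loop computes T = v5(n!)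
theorem pvLegLoop_eq_padicVal (n : Int) (hn : 2 ≤ n) :
    pvLegLoop n 5 0 = (padicValNat 5 (Nat.factorial n.toNat) : Int) := by
  have h5 : Fact (Nat.Prime 5) := ⟨by norm_num⟩
  set N := n.toNat with hN
  have hnN : n = (N : Int) := by omega
  have hb1 : N < 5 ^ (1 + N) :=
    lt_of_lt_of_le (Nat.lt_pow_self (by norm_num)) (Nat.pow_le_pow_right (by norm_num) (by omega))
  have hbound : n < 5 ^ (1 + N) := by
    calc n ≤ (N : Int) := by omega
    _ < ((5 ^ (1 + N) : ℕ) : Int) := by exact_mod_cast hb1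
    _ = 5 ^ (1 + N) := by push_cast; ring
  have hsum := pvLegLoop_sum n (by omega) N 1 0 hbound
  simp only [pow_one, zero_add] at hsum
  rw [hsum, padicValNat_factorial (p := 5) (b := 1 + N) (by have := Nat.log_le_self 5 N; omega)]
  rw [Nat.cast_sum]
  refine Finset.sum_congr rfl ?_
  intro i _
  rw [hnN, show ((5:Int) ^ i) = ((5 ^ i : ℕ) : Int) by push_cast; ring, PySem.Int.floordiv_natCast]

-- uniqueness of the zero-stripped form
theorem pvUniq_aux (a b : Int) (j k : ℕ) (hjk : j ≤ k) (hab : a * 10 ^ j = b * 10 ^ k)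
    (hma : PySem.Int.mod a 10 ≠ 0) : a = b * 10 ^ (k - j) := by
  have h10 : (10:Int) ^ j ≠ 0 := by positivity
  have : a * 10 ^ j = b * 10 ^ (k - j) * 10 ^ j := by
    rw [mul_assoc, ← pow_add]
    rw [show k - j + j = k from by omega]
    exact hab
  exact mul_right_cancel₀ h10 this

theorem pvUniq (a b : Int) (j k : ℕ) (hab : a * 10 ^ j = b * 10 ^ k)
    (hma : PySem.Int.mod a 10 ≠ 0) (hmb : PySem.Int.mod b 10 ≠ 0) : a = b := by
  have hdvd : ∀ x : Int, PySem.Int.mod x 10 ≠ 0 → ¬ (10 ∣ x) := by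
    intro x hx hd
    exact hx ((PySem.Int.mod_eq_zero_iff_dvd x 10).mpr hd)
  rcases le_total j k with h | h
  · have := pvUniq_aux a b j k h hab hma
    rcases Nat.eq_zero_or_pos (k - j) with hz | hpos
    · rw [this, hz, pow_zero, mul_one]
    · exfalso
      obtain ⟨d, hd⟩ : ∃ d, k - j = d + 1 := ⟨k - j - 1, by omega⟩
      refine hdvd a hma ⟨b * 10 ^ d, ?_⟩
      rw [this, hd, pow_succ]; ring
  · have := pvUniq_aux b a k j h hab.symm hmb
    rcases Nat.eq_zero_or_pos (j - k) with hz | hpos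
    · rw [this, hz, pow_zero, mul_one]
    · exfalso
      obtain ⟨d, hd⟩ : ∃ d, j - k = d + 1 := ⟨j - k - 1, by omega⟩
      refine hdvd b hmb ⟨a * 10 ^ d, ?_⟩
      rw [this, hd, pow_succ]; ring

-- B's value for n ≥ 2 is the exact quotient q, cast to Int
theorem pvAlt_eq (n : Int) (hn : 2 ≤ n) :
    FactorialMod10_alt n = ((Nat.factorial n.toNat / 10 ^ padicValNat 5 (Nat.factorial n.toNat) : ℕ) : Int) := by
  have hN2 : 2 ≤ n.toNat := by omega
  unfold FactorialMod10_alt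
  rw [if_neg (by omega)]
  rw [pvProdRange_eq_pvIcc, pvIcc_two_eq_pvFac n (by omega), pvFac_eq_factorial,
    pvLegLoop_eq_padicVal n hn]
  set N := n.toNat
  set T := padicValNat 5 (Nat.factorial N)
  rw [Int.toNat_natCast]
  rw [show ((10:Int) ^ T) = ((10 ^ T : ℕ) : Int) by push_cast; ring]
  rw [show ((Nat.factorial N : Int)) = (((Nat.factorial N / 10 ^ T) * 10 ^ T : ℕ) : Int) by
    rw [Nat.div_mul_cancel (pvTenPow_dvd N hN2)]]
  rw [PySem.Int.floordiv_natCast]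
  congr 1
  exact Nat.mul_div_cancel _ (by positivity)

-- ===== VERDICT (by name: the statement is the Claim_ definition above) =====
theorem FactorialMod10_spec : Claim_equal_FactorialMod10 := by
  unfold Claim_equal_FactorialMod10 Spec_FactorialMod10
  intro n _
  by_cases hn : n ≤ 1
  · have hA : pvLoopA n 1 = 1 := by
      rw [pvLoopA.eq_def]; simp [show ¬ (1:Int) < n from by omega]
    unfold FactorialMod10 FactorialMod10_alt
    rw [hA, if_pos hn]
  · push_neg at hn
    have hn2 : 2 ≤ n := by omega
    have hN2 : 2 ≤ n.toNat := by omega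
    obtain ⟨k, hk, hpos, hmod⟩ := pvLoopA_spec n 1 (by norm_num) (by decide)
    rw [one_mul, pvFac_eq_factorial] at hk
    set N := n.toNat
    set T := padicValNat 5 (Nat.factorial N)
    set q : ℕ := Nat.factorial N / 10 ^ T with hq
    have hqmul : (q : Int) * 10 ^ T = (Nat.factorial N : Int) := by
      rw [show ((10:Int) ^ T) = ((10 ^ T : ℕ) : Int) by push_cast; ring]
      rw [← Nat.cast_mul, Nat.div_mul_cancel (pvTenPow_dvd N hN2)]
    have hqmod : PySem.Int.mod (q : Int) 10 ≠ 0 := by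
      intro hz
      have hd : (10:Int) ∣ (q : Int) := (PySem.Int.mod_eq_zero_iff_dvd _ 10).mp hz
      have : (10:ℕ) ∣ q := by exact_mod_cast hd
      exact pvQuot_not_dvd N hN2 this
    have : FactorialMod10 n = (q : Int) := by
      refine pvUniq (FactorialMod10 n) (q : Int) k T ?_ hmod hqmod
      rw [hqmul]
      exact hk
    rw [this, pvAlt_eq n hn2]
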